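-- pv_equiv track=rewrite | github.com/AirapetyanZhirayr/GenFS | custom_algorithms.py | get_normal_form
-- ===== SOURCE A (Python) =====
-- def get_normal_form(vocabulary):
--     """Creates and returns a dictionary of words that are not in normal form
--         Example : dict[dogs] = dog"""
--     normal_form_dict = {}
--     vocabulary = list(vocabulary)
--     for i in range(len(vocabulary)):
--         t1 = vocabulary[i]
--         for j in range(len(vocabulary)):
--             t2 = vocabulary[j]
--             if ((t1 + 's') == t2 or ((t1 + 'es') == t2) or
--                     ((t1 + 'ing') == t2) or ((t1[:-1] + 'ing') == t2)):
--                 normal_form_dict[t2] = t1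
--
--     return normal_form_dict
-- ===== SOURCE B (Python) =====
-- def get_normal_form(vocabulary):
--     """Creates and returns a dictionary of words that are not in normal form
--         Example : dict[dogs] = dog"""
--     vocab = list(vocabulary)
--     pos = {}
--     for j, w in enumerate(vocab):
--         if w not in pos:
--             pos[w] = j
--     normal_form_dict = {}
--     for t1 in vocab:
--         cands = [t1 + 's', t1 + 'es', t1 + 'ing']
--         if t1:
--             cands.append(t1[:-1] + 'ing')
--         present = [c for c in cands if c in pos]
--         present.sort(key=lambda c: pos[c])
--         for c in present:
--             normal_form_dict[c] = t1
--     return normal_form_dict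
-- ===== Notes on version B (the rewrite author's own statement) =====
-- stated objective: faster
-- what changed: B inverts the inner scan: instead of comparing every pair of words, it hashes each word's first-occurrence index once and, for each word t1, looks up its at most four derived candidate forms (t1+'s', t1+'es', t1+'ing', t1[:-1]+'ing') in that dict, inserting the present ones in first-occurrence order.
import Mathlib
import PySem

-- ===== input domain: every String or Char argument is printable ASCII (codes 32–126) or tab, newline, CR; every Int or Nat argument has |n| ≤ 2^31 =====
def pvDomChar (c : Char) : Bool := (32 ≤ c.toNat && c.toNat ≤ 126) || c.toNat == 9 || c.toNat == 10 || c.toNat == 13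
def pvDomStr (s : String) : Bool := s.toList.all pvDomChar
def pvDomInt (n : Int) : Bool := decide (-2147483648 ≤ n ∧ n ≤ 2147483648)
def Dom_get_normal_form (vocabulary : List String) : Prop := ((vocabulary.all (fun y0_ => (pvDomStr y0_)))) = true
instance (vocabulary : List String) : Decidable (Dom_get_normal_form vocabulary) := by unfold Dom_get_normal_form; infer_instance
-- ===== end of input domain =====

-- B replaces A's quadratic all-pairs scan by hash lookups of each word's ≤4 derived candidate
-- forms against a first-occurrence-index dict (objective: faster; proved equal on all inputs).


-- ===== PORT A =====
-- the condition of A's inner 'if' (t1[:-1] is PySem.Str.slice … (-1), exact)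
def pvMatch (t1 t2 : String) : Bool :=
  (t1 ++ "s" == t2) || (t1 ++ "es" == t2) || (t1 ++ "ing" == t2) ||
    (PySem.Str.slice t1 none (some (-1)) ++ "ing" == t2)

def get_normal_form (vocabulary : List String) : List (String × String) :=
  (vocabulary.foldl (fun d t1 =>
      vocabulary.foldl (fun d t2 => if pvMatch t1 t2 then d.insert t2 t1 else d) d)
    (PySem.Dict.empty : PySem.Dict String String)).items

-- ===== PORT B =====
-- Source B's candidate list: [t1+'s', t1+'es', t1+'ing'] plus t1[:-1]+'ing' when t1 is nonempty
def pvCands (t1 : String) : List String :=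
  if t1 ≠ "" then
    [t1 ++ "s", t1 ++ "es", t1 ++ "ing"] ++ [PySem.Str.slice t1 none (some (-1)) ++ "ing"]
  else [t1 ++ "s", t1 ++ "es", t1 ++ "ing"]

-- Source B's 'pos' dict: word -> its first index (insert only when the key is absent)
def pvPos (vocab : List String) : PySem.Dict String Int :=
  (PySem.List.enumerate vocab).foldl
    (fun p jw => if p.contains jw.2 then p else p.insert jw.2 jw.1)
    (PySem.Dict.empty : PySem.Dict String Int)

def get_normal_form_alt (vocabulary : List String) : List (String × String) :=
  let pos := pvPos vocabulary
  (vocabulary.foldl (fun d t1 =>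
      let present := (pvCands t1).filter (fun c => pos.contains c)
      let presentSorted := PySem.List.sorted present (fun c => pos.getD c 0)
      presentSorted.foldl (fun d c => d.insert c t1) d)
    (PySem.Dict.empty : PySem.Dict String String)).items

-- ===== PRECONDITION & SPEC =====
def Spec_get_normal_form (vocabulary : List String) (out : List (String × String)) : Prop := out = get_normal_form_alt vocabulary
instance (vocabulary : List String) (out : List (String × String)) : Decidable (Spec_get_normal_form vocabulary out) := by unfold Spec_get_normal_form; infer_instance

-- ===== CLAIM (what is proved, stated in full; the proofs are below) =====
def Claim_equal_get_normal_form : Prop := ∀ (vocabulary : List String), Dom_get_normal_form vocabulary → Spec_get_normal_form vocabulary (get_normal_form vocabulary)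

-- ===== LEMMAS AND PROOFS =====

lemma pv_contains_eq {ν : Type} (d : PySem.Dict String ν) (k : String) :
    d.contains k = (d.get? k).isSome := by
  unfold PySem.Dict.contains PySem.Dict.get?
  induction d.items with
  | nil => rfl
  | cons p l ih => by_cases hp : p.1 == k <;> simp [hp, ih]

lemma pv_insert_keys_nodup {ν : Type} (d : PySem.Dict String ν) (k : String) (v : ν)
    (h : d.keys.Nodup) : (d.insert k v).keys.Nodup := by
  unfold PySem.Dict.keys at *
  unfold PySem.Dict.insert
  by_cases hc : d.contains k = true
  · simp only [hc, if_true, List.map_map]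
    have he : ((fun x => Prod.fst x) ∘ fun p : String × ν => if p.1 == k then (k, v) else p)
        = fun p : String × ν => p.1 := by
      funext p; by_cases hp : p.1 = k <;> simp [hp]
    rw [he]; exact h
  · have hk : ∀ (x : ν), (k, x) ∉ d.items := by
      simpa [PySem.Dict.contains, List.any_eq_true] using hc
    rw [if_neg hc]
    simp only [List.map_append, List.map_cons, List.map_nil]
    rw [List.nodup_append]
    refine ⟨h, by simp, ?_⟩
    intro a ha b hb heq
    have hb' : b = k := by simpa using hb
    subst hb'
    subst heq
    rcases List.mem_map.mp ha with ⟨⟨a, x⟩, hp, hfst⟩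
    simp only at hfst
    subst hfst
    exact hk x hp

lemma pv_find_unique {ν : Type} (k : String) (v : ν) :
    ∀ (l : List (String × ν)), (l.map Prod.fst).Nodup →
      (l.find? (fun p => p.1 == k)) = some (k, v) → ∀ p ∈ l, p.1 = k → p.2 = v := by
  intro l
  induction l with
  | nil => simp
  | cons q l ih =>
    intro hnd hf p hp hpk
    simp only [List.map_cons, List.nodup_cons] at hnd
    by_cases hq : q.1 = k
    · rw [List.find?_cons_of_pos (by simp [hq])] at hf
      have hqv : q = (k, v) := by simpa using hf
      rcases List.mem_cons.mp hp with rfl | hpl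
      · simp [hqv]
      · exact absurd (List.mem_map.mpr ⟨p, hpl, by rw [hpk, hq]⟩) hnd.1
    · rw [List.find?_cons_of_neg (by simp [hq])] at hf
      rcases List.mem_cons.mp hp with rfl | hpl
      · exact absurd hpk hq
      · exact ih hnd.2 hf p hpl hpk

lemma pv_insert_same {ν : Type} (d : PySem.Dict String ν) (k : String) (v : ν)
    (hk : d.keys.Nodup) (hv : d.get? k = some v) : d.insert k v = d := by
  have hc : d.contains k = true := by
    rw [pv_contains_eq, hv]; rfl
  have hfind : d.items.find? (fun p => p.1 == k) = some (k, v) := by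
    unfold PySem.Dict.get? at hv
    rcases hfe : d.items.find? (fun p => p.1 == k) with _ | p
    · rw [hfe] at hv; simp at hv
    · rw [hfe] at hv
      have h1 : p.2 = v := by simpa using hv
      have h2 : p.1 = k := by simpa using List.find?_some hfe
      have : p = (k, v) := by obtain ⟨a, b⟩ := p; simp_all
      rw [hfe, this]
  have huniq := pv_find_unique k v d.items hk hfind
  unfold PySem.Dict.insert
  rw [if_pos hc]
  have hmap : d.items.map (fun p => if p.1 == k then (k, v) else p) = d.items := by
    conv_rhs => rw [← List.map_id d.items]
    apply List.map_congr_left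
    intro p hp
    by_cases hpk : p.1 = k
    · obtain ⟨a, b⟩ := p
      simp only at hpk
      subst hpk
      have h2 := huniq (a, b) hp rfl
      simp only at h2
      simp [h2]
    · simp [hpk]
  rw [hmap]

def pvDedup : List String → List String
  | [] => []
  | k :: ks => k :: pvDedup (ks.filter (fun c => ¬ (c == k)))
termination_by l => l.length
decreasing_by simpa using Nat.lt_succ_of_le ((List.length_filter_le _ _).trans (by simp))

def pvIns (t1 : String) (ks : List String) (d : PySem.Dict String String) : PySem.Dict String String :=
  ks.foldl (fun d c => d.insert c t1) d

lemma pvDedup_nil : pvDedup [] = [] := by rw [pvDedup]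

lemma pvDedup_cons (k : String) (ks : List String) :
    pvDedup (k :: ks) = k :: pvDedup (ks.filter (fun c => ¬ (c == k))) := by
  rw [pvDedup]

lemma pvIns_nodup (t1 : String) :
    ∀ (ks : List String) (d : PySem.Dict String String), d.keys.Nodup → (pvIns t1 ks d).keys.Nodup := by
  intro ks
  induction ks with
  | nil => intro d h; exact h
  | cons c ks ih => intro d h; exact ih _ (pv_insert_keys_nodup d c t1 h)

lemma pvIns_skip (t1 k : String) :
    ∀ (ks : List String) (d : PySem.Dict String String), d.keys.Nodup → d.get? k = some t1 →
      pvIns t1 ks d = pvIns t1 (ks.filter (fun c => ¬ (c == k))) d := by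
  intro ks
  induction ks with
  | nil => intro d _ _; rfl
  | cons c ks ih =>
    intro d hnd hget
    by_cases hc : c = k
    · subst hc
      have : d.insert c t1 = d := pv_insert_same d c t1 hnd hget
      simp only [pvIns, List.foldl_cons, List.filter_cons, this]
      simpa [pvIns] using ih d hnd hget
    · have hfc : (fun c' => ¬ (c' == k)) c = true := by simp [hc]
      simp only [pvIns, List.foldl_cons, List.filter_cons, hfc]
      exact ih (d.insert c t1) (pv_insert_keys_nodup d c t1 hnd)
        (by rw [PySem.Dict.get?_insert_of_ne _ _ (fun h => hc h.symm)]; exact hget)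

lemma pvIns_dedup_aux (t1 : String) :
    ∀ (n : Nat) (ks : List String), ks.length ≤ n → ∀ (d : PySem.Dict String String), d.keys.Nodup →
      pvIns t1 ks d = pvIns t1 (pvDedup ks) d := by
  intro n
  induction n with
  | zero =>
    intro ks hlen d _
    have : ks = [] := List.eq_nil_of_length_eq_zero (Nat.le_zero.mp hlen)
    subst this; rw [pvDedup_nil]
  | succ n ih =>
    intro ks hlen d hnd
    cases ks with
    | nil => rw [pvDedup_nil]
    | cons k ks =>
      rw [pvDedup_cons]
      have h1 : pvIns t1 (k :: ks) d = pvIns t1 ks (d.insert k t1) := rfl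
      have h2 : pvIns t1 (k :: pvDedup (ks.filter (fun c => ¬ (c == k)))) d
          = pvIns t1 (pvDedup (ks.filter (fun c => ¬ (c == k)))) (d.insert k t1) := rfl
      rw [h1, h2]
      have hnd' := pv_insert_keys_nodup d k t1 hnd
      rw [pvIns_skip t1 k ks (d.insert k t1) hnd' (PySem.Dict.get?_insert_self d k t1)]
      exact ih _ ((List.length_filter_le _ _).trans (by simpa using Nat.succ_le_succ_iff.mp hlen)) _ hnd'

lemma pvIns_dedup (t1 : String) (ks : List String) (d : PySem.Dict String String)
    (hnd : d.keys.Nodup) : pvIns t1 ks d = pvIns t1 (pvDedup ks) d :=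
  pvIns_dedup_aux t1 ks.length ks le_rfl d hnd

lemma mem_pvDedup (x : String) :
    ∀ (n : Nat) (ks : List String), ks.length ≤ n → (x ∈ pvDedup ks ↔ x ∈ ks) := by
  intro n
  induction n with
  | zero =>
    intro ks hlen
    have : ks = [] := List.eq_nil_of_length_eq_zero (Nat.le_zero.mp hlen)
    subst this; simp [pvDedup]
  | succ n ih =>
    intro ks hlen
    cases ks with
    | nil => simp [pvDedup]
    | cons k ks =>
      rw [pvDedup_cons]
      simp only [List.mem_cons]
      rw [ih _ ((List.length_filter_le _ _).trans (by simpa using Nat.succ_le_succ_iff.mp hlen))]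
      constructor
      · rintro (rfl | hm)
        · left; rfl
        · right; exact (List.mem_filter.mp hm).1
      · rintro (rfl | hm)
        · left; rfl
        · by_cases hx : x = k
          · left; exact hx
          · right; exact List.mem_filter.mpr ⟨hm, by simp [hx]⟩

lemma nodup_pvDedup :
    ∀ (n : Nat) (ks : List String), ks.length ≤ n → (pvDedup ks).Nodup := by
  intro n
  induction n with
  | zero =>
    intro ks hlen
    have : ks = [] := List.eq_nil_of_length_eq_zero (Nat.le_zero.mp hlen)
    subst this; simp [pvDedup]
  | succ n ih =>
    intro ks hlen
    cases ks with
    | nil => simp [pvDedup]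
    | cons k ks =>
      rw [pvDedup_cons, List.nodup_cons]
      have hle : (ks.filter (fun c => ¬ (c == k))).length ≤ n :=
        (List.length_filter_le _ _).trans (by simpa using Nat.succ_le_succ_iff.mp hlen)
      constructor
      · intro hmem
        have := (mem_pvDedup k n _ hle).mp hmem
        simpa using (List.mem_filter.mp this).2
      · exact ih _ hle

lemma mem_pvDedup' (x : String) (ks : List String) : x ∈ pvDedup ks ↔ x ∈ ks :=
  mem_pvDedup x ks.length ks le_rfl

lemma pvDedup_pairwise (l : List String) :
    ∀ (P : String → Bool),
      (pvDedup (l.filter P)).Pairwise (fun a b => l.idxOf a < l.idxOf b) := by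
  induction l with
  | nil => intro P; simp [pvDedup_nil]
  | cons x l ih =>
    intro P
    rw [List.filter_cons]
    by_cases hPx : P x = true
    · rw [if_pos hPx, pvDedup_cons, List.pairwise_cons]
      have hmem : ∀ b ∈ pvDedup ((l.filter P).filter (fun c => ¬ (c == x))),
          b ∈ l ∧ P b = true ∧ b ≠ x := by
        intro b hb
        have hb' := (mem_pvDedup' b _).mp hb
        have h1 := List.mem_filter.mp hb'
        have h2 := List.mem_filter.mp h1.1
        exact ⟨h2.1, h2.2, by simpa using h1.2⟩
      constructor
      · intro b hb
        rcases hmem b hb with ⟨hbl, _, hbx⟩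
        rw [List.idxOf_cons_self, List.idxOf_cons_ne l hbx.symm]
        exact Nat.succ_pos _
      · have := ih (fun c => (¬ (c == x)) && P c)
        rw [← List.filter_filter] at this
        refine this.imp_of_mem ?_
        intro a b ha hb hab
        rcases hmem a ha with ⟨_, _, hax⟩
        rcases hmem b hb with ⟨_, _, hbx⟩
        rw [List.idxOf_cons_ne l hax.symm, List.idxOf_cons_ne l hbx.symm]
        exact Nat.succ_lt_succ hab
    · rw [if_neg hPx]
      refine (ih P).imp_of_mem ?_
      intro a b ha hb hab
      have hax : a ≠ x := by
        have := List.mem_filter.mp ((mem_pvDedup' a _).mp ha)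
        intro h; rw [h] at this; exact hPx this.2
      have hbx : b ≠ x := by
        have := List.mem_filter.mp ((mem_pvDedup' b _).mp hb)
        intro h; rw [h] at this; exact hPx this.2
      rw [List.idxOf_cons_ne l hax.symm, List.idxOf_cons_ne l hbx.symm]
      exact Nat.succ_lt_succ hab

lemma pvPos_get? (vocab : List String) (w : String) :
    (pvPos vocab).get? w = if w ∈ vocab then some ((vocab.idxOf w : Nat) : Int) else none := by
  induction vocab using List.reverseRecOn generalizing w with
  | nil => simp [pvPos, PySem.List.enumerate, PySem.Dict.get?, PySem.Dict.empty]
  | append_singleton xs x ih =>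
    have hstep : pvPos (xs ++ [x])
        = (fun p (jw : Int × String) => if p.contains jw.2 then p else p.insert jw.2 jw.1)
            (pvPos xs) ((0 : Int) + (xs.length : Int), x) := by
      unfold pvPos
      rw [PySem.List.enumerate_append, List.foldl_append]
      simp [PySem.List.enumerate]
    rw [hstep]
    dsimp only
    by_cases hx : x ∈ xs
    · have hcont : (pvPos xs).contains x = true := by
        rw [pv_contains_eq, ih x]; simp [hx]
      rw [if_pos hcont, ih w]
      by_cases hw : w ∈ xs
      · rw [if_pos hw, if_pos (List.mem_append_left _ hw), List.idxOf_append, if_pos hw]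
      · rw [if_neg hw, if_neg (by simp [hw, show w ≠ x from fun h => hw (h ▸ hx)])]
    · have hcont : (pvPos xs).contains x = false := by
        rw [pv_contains_eq, ih x]; simp [hx]
      rw [if_neg (by simp [hcont])]
      by_cases hwx : w = x
      · subst hwx
        rw [PySem.Dict.get?_insert_self]
        rw [if_pos (by simp : w ∈ xs ++ [w])]
        rw [List.idxOf_append, if_neg hx]
        simp [List.idxOf_cons_self]
      · rw [PySem.Dict.get?_insert_of_ne _ _ hwx, ih w]
        by_cases hw : w ∈ xs
        · rw [if_pos hw, if_pos (List.mem_append_left _ hw), List.idxOf_append, if_pos hw]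
        · rw [if_neg hw, if_neg (by simp [hw, hwx])]

lemma pv_toList_append (s t : String) : (s ++ t).toList = s.toList ++ t.toList := by simp

lemma pv_slice_toList (s : String) :
    (PySem.Str.slice s none (some (-1))).toList = s.toList.dropLast := by simp [pysem]

lemma pvCands_nodup (t1 : String) : (pvCands t1).Nodup := by
  by_cases h : t1 = ""
  · subst h; decide
  · have hnil : t1.toList ≠ [] := by simp [h]
    rw [pvCands, if_pos h]
    have key : ∀ (u v : String), u.toList ≠ v.toList → u ≠ v := fun u v huv he => huv (he ▸ rfl)
    simp only [List.nodup_cons, List.mem_cons, List.cons_append,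
      List.nil_append, List.nodup_nil, List.not_mem_nil, or_false, not_or]
    refine ⟨⟨?_, ?_, ?_⟩, ⟨?_, ?_⟩, ?_, not_false, trivial⟩
    · apply key; intro hEq
      have := congrArg List.length hEq; simp at this
    · apply key; intro hEq
      have := congrArg List.length hEq; simp at this
    · apply key; intro hEq
      have := congrArg List.reverse hEq
      simp at this
    · apply key; intro hEq
      have := congrArg List.length hEq; simp at this
    · apply key; intro hEq
      have := congrArg List.reverse hEq
      simp at this
    · apply key; intro hEq
      have hca : t1.toList ++ "ing".toList = t1.toList.dropLast ++ "ing".toList := by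
        have := hEq
        simp only [pv_toList_append, pv_slice_toList] at this
        exact this
      have hc := List.append_cancel_right hca
      have hlen := congrArg List.length hc
      rw [List.length_dropLast] at hlen
      have h0 : t1.toList.length ≠ 0 := fun hh => hnil (List.eq_nil_of_length_eq_zero hh)
      omega

lemma pv_slice_empty : PySem.Str.slice "" none (some (-1)) = "" := by decide

lemma pvMatch_eq_contains (t1 t2 : String) : pvMatch t1 t2 = (pvCands t1).contains t2 := by
  rw [Bool.eq_iff_iff]
  by_cases h : t1 = ""
  · subst h
    rw [pvMatch, pvCands, if_neg (by simp), pv_slice_empty]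
    simp only [List.contains_iff_mem, List.mem_cons, List.not_mem_nil, or_false,
      Bool.or_eq_true, beq_iff_eq]
    constructor <;> intro hh <;> simp only [eq_comm] at hh ⊢ <;> tauto
  · rw [pvMatch, pvCands, if_pos h]
    simp only [List.contains_iff_mem, List.cons_append, List.nil_append, List.mem_cons,
      List.not_mem_nil, or_false, Bool.or_eq_true, beq_iff_eq]
    constructor <;> intro hh <;> simp only [eq_comm] at hh ⊢ <;> tauto

lemma pvPos_contains (vocab : List String) (w : String) :
    (pvPos vocab).contains w = true ↔ w ∈ vocab := by
  rw [pv_contains_eq, pvPos_get?]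
  by_cases hw : w ∈ vocab <;> simp [hw]

lemma pvPos_getD (vocab : List String) (w : String) (hw : w ∈ vocab) :
    (pvPos vocab).getD w 0 = ((vocab.idxOf w : Nat) : Int) := by
  unfold PySem.Dict.getD
  rw [pvPos_get?, if_pos hw]
  rfl

lemma sorted_present (vocab : List String) (t1 : String) :
    PySem.List.sorted ((pvCands t1).filter (fun c => (pvPos vocab).contains c))
      (fun c => (pvPos vocab).getD c 0) =
    pvDedup (vocab.filter (fun t2 => (pvCands t1).contains t2)) := by
  apply PySem.List.sorted_eq_of_perm_of_pairwise_lt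
  · rw [List.perm_ext_iff_of_nodup
      (nodup_pvDedup _ _ le_rfl) ((pvCands_nodup t1).filter _)]
    intro a
    rw [mem_pvDedup']
    constructor
    · intro ha
      rcases List.mem_filter.mp ha with ⟨hav, hac⟩
      exact List.mem_filter.mpr ⟨List.contains_iff_mem.mp hac, by simpa [pvPos_contains] using hav⟩
    · intro ha
      rcases List.mem_filter.mp ha with ⟨hac, hav⟩
      exact List.mem_filter.mpr ⟨(pvPos_contains vocab a).mp hav, List.contains_iff_mem.mpr hac⟩
  · refine (pvDedup_pairwise vocab _).imp_of_mem ?_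
    intro a b ha hb hab
    have hav : a ∈ vocab := (List.mem_filter.mp ((mem_pvDedup' a _).mp ha)).1
    have hbv : b ∈ vocab := (List.mem_filter.mp ((mem_pvDedup' b _).mp hb)).1
    rw [pvPos_getD vocab a hav, pvPos_getD vocab b hbv]
    exact_mod_cast hab

lemma pvRound_eq (vocab : List String) (t1 : String) (d : PySem.Dict String String)
    (hd : d.keys.Nodup) :
    vocab.foldl (fun d t2 => if pvMatch t1 t2 then d.insert t2 t1 else d) d =
    pvIns t1 (PySem.List.sorted ((pvCands t1).filter (fun c => (pvPos vocab).contains c))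
      (fun c => (pvPos vocab).getD c 0)) d := by
  have h1 : vocab.foldl (fun d t2 => if pvMatch t1 t2 then d.insert t2 t1 else d) d
      = pvIns t1 (vocab.filter (fun t2 => pvMatch t1 t2)) d := by
    rw [pvIns, List.foldl_filter]
  rw [h1, List.filter_congr (fun t2 _ => pvMatch_eq_contains t1 t2),
    pvIns_dedup t1 _ d hd, ← sorted_present]

lemma outer_eq (vocab : List String) :
    ∀ (l : List String) (d : PySem.Dict String String), d.keys.Nodup →
      l.foldl (fun d t1 =>
        vocab.foldl (fun d t2 => if pvMatch t1 t2 then d.insert t2 t1 else d) d) d =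
      l.foldl (fun d t1 =>
        pvIns t1 (PySem.List.sorted ((pvCands t1).filter (fun c => (pvPos vocab).contains c))
          (fun c => (pvPos vocab).getD c 0)) d) d := by
  intro l
  induction l with
  | nil => intro d _; rfl
  | cons t1 l ih =>
    intro d hd
    rw [List.foldl_cons, List.foldl_cons, pvRound_eq vocab t1 d hd]
    exact ih _ (pvIns_nodup t1 _ d hd)

-- ===== VERDICT (by name: the statement is the Claim_ definition above) =====
theorem get_normal_form_spec : Claim_equal_get_normal_form := by
  intro vocab _
  unfold Spec_get_normal_form get_normal_form get_normal_form_alt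
  have h := outer_eq vocab vocab PySem.Dict.empty (by simp [PySem.Dict.keys, PySem.Dict.empty])
  simp only [pvIns] at h
  rw [h]
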